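-- pv_equiv track=rewrite | github.com/Zeppelinpp/ContractGraph | src/analysis/shell_entity.py | get_cluster_link_types
-- ===== SOURCE A (Python) =====
-- def get_cluster_link_types(cluster, link_details):
--     """Get link types within a cluster"""
--     link_types = set()
--     for i, c1 in enumerate(cluster):
--         for c2 in cluster:
--             if c1 != c2:
--                 details = link_details.get((c1, c2), {})
--                 if details.get("legal_person"):
--                     link_types.add("法人")
--                 if details.get("phone"):
--                     link_types.add("电话")
--                 if details.get("employment"):
--                     link_types.add("任职")
--                 if details.get("controls"):
--                     link_types.add("控股")
--     return link_types
-- ===== SOURCE B (Python) =====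
-- def get_cluster_link_types(cluster, link_details):
--     """Get link types within a cluster"""
--     members = set(cluster)
--     link_types = set()
--     for (c1, c2), details in link_details.items():
--         if c1 != c2 and c1 in members and c2 in members:
--             if details.get("legal_person"):
--                 link_types.add("法人")
--             if details.get("phone"):
--                 link_types.add("电话")
--             if details.get("employment"):
--                 link_types.add("任职")
--             if details.get("controls"):
--                 link_types.add("控股")
--     return link_types
-- ===== Notes on version B (the rewrite author's own statement) =====
-- stated objective: faster
-- what changed: Instead of looking up every ordered pair of cluster members in the dict (quadratic in the cluster size), B makes a single pass over link_details and keeps the link types of entries whose both endpoints lie in the cluster set.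
import Mathlib
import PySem

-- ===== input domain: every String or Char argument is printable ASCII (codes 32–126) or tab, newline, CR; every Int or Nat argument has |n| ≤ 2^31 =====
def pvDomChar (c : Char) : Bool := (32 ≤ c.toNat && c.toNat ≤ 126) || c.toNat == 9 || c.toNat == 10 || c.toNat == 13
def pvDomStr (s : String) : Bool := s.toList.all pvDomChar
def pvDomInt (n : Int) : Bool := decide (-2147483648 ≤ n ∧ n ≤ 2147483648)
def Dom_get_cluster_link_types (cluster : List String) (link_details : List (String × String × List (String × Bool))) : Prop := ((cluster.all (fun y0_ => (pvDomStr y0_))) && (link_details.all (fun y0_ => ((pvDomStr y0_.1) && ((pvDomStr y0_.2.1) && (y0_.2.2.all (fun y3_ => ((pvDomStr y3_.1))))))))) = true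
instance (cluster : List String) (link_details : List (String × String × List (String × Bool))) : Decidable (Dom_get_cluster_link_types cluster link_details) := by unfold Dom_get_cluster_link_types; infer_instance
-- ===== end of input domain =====

-- B replaces A's quadratic scan over all ordered cluster pairs by a single pass over
-- link_details filtered by a cluster membership set; objective: faster.
-- Both Pythons return a SET (unordered); its iteration order is not modelled, so both
-- ports return that set in sorted order — the same finite set, in a canonical order.


-- ===== PORT A =====
-- details.get(key) used as a truth value (missing key or False → falsy)
def pvDet (details : List (String × Bool)) (key : String) : Bool :=
  PySem.Dict.getD (PySem.Dict.mk details) key false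

-- link_details.get((c1, c2), {})
def pvLookup (link_details : List (String × String × List (String × Bool))) (c1 c2 : String) : List (String × Bool) :=
  PySem.Dict.getD (PySem.Dict.mk (link_details.map (fun e => ((e.1, e.2.1), e.2.2)))) (c1, c2) []

def get_cluster_link_types (cluster : List String) (link_details : List (String × String × List (String × Bool))) : List String :=
  let link_types :=
    (PySem.List.enumerate cluster).foldl (fun link_types ic =>
      cluster.foldl (fun link_types c2 =>
        if ic.2 != c2 then
          let details := pvLookup link_details ic.2 c2
          let lt1 := if pvDet details "legal_person" then PySem.Set.add link_types "法人" else link_types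
          let lt2 := if pvDet details "phone" then PySem.Set.add lt1 "电话" else lt1
          let lt3 := if pvDet details "employment" then PySem.Set.add lt2 "任职" else lt2
          if pvDet details "controls" then PySem.Set.add lt3 "控股" else lt3
        else link_types) link_types) PySem.Set.empty
  -- the returned value is a set: canonical (sorted) representation
  PySem.List.sorted link_types (fun x => x) false

-- ===== PORT B =====
-- link_details.items(): the items of the dict the association list denotes —
-- first occurrence of each key (exact: a Python dict has unique keys)
def pvItems (ld : List (String × String × List (String × Bool))) (seen : PySem.Set (String × String)) : List (String × String × List (String × Bool)) :=
  match ld with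
  | [] => []
  | e :: rest =>
      if PySem.Set.contains seen (e.1, e.2.1) then pvItems rest seen
      else e :: pvItems rest (PySem.Set.add seen (e.1, e.2.1))

def get_cluster_link_types_alt (cluster : List String) (link_details : List (String × String × List (String × Bool))) : List String :=
  let members := PySem.Set.ofList cluster
  let link_types :=
    (pvItems link_details PySem.Set.empty).foldl (fun lt e =>
      if e.1 != e.2.1 && PySem.Set.contains members e.1 && PySem.Set.contains members e.2.1 then
        let lt1 := if pvDet e.2.2 "legal_person" then PySem.Set.add lt "法人" else lt
        let lt2 := if pvDet e.2.2 "phone" then PySem.Set.add lt1 "电话" else lt1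
        let lt3 := if pvDet e.2.2 "employment" then PySem.Set.add lt2 "任职" else lt2
        if pvDet e.2.2 "controls" then PySem.Set.add lt3 "控股" else lt3
      else lt) PySem.Set.empty
  -- the returned value is a set: canonical (sorted) representation
  PySem.List.sorted link_types (fun x => x) false

-- ===== PRECONDITION & SPEC =====
def Spec_get_cluster_link_types (cluster : List String) (link_details : List (String × String × List (String × Bool))) (out : List String) : Prop := out = get_cluster_link_types_alt cluster link_details
instance (cluster : List String) (link_details : List (String × String × List (String × Bool))) (out : List String) : Decidable (Spec_get_cluster_link_types cluster link_details out) := by unfold Spec_get_cluster_link_types; infer_instance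

-- ===== CLAIM (what is proved, stated in full; the proofs are below) =====
def Claim_equal_get_cluster_link_types : Prop := ∀ (cluster : List String) (link_details : List (String × String × List (String × Bool))), Dom_get_cluster_link_types cluster link_details → Spec_get_cluster_link_types cluster link_details (get_cluster_link_types cluster link_details)

-- ===== LEMMAS AND PROOFS =====

-- the four conditional labels a pair (resp. an item) contributes
def pvCondA (ld : List (String × String × List (String × Bool))) (key : String) (p : String × String) : Bool :=
  (p.1 != p.2) && pvDet (pvLookup ld p.1 p.2) key

def pvTrig (ld : List (String × String × List (String × Bool))) (p : String × String) : List String :=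
  ((if pvCondA ld "legal_person" p then ["法人"] else []) ++ (if pvCondA ld "phone" p then ["电话"] else [])) ++
  ((if pvCondA ld "employment" p then ["任职"] else []) ++ (if pvCondA ld "controls" p then ["控股"] else []))

def pvQualB (cluster : List String) (e : String × String × List (String × Bool)) : Bool :=
  (e.1 != e.2.1) && cluster.contains e.1 && cluster.contains e.2.1

def pvCondE (cluster : List String) (key : String) (e : String × String × List (String × Bool)) : Bool :=
  pvQualB cluster e && pvDet e.2.2 key

def pvTrigE (cluster : List String) (e : String × String × List (String × Bool)) : List String :=
  ((if pvCondE cluster "legal_person" e then ["法人"] else []) ++ (if pvCondE cluster "phone" e then ["电话"] else [])) ++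
  ((if pvCondE cluster "employment" e then ["任职"] else []) ++ (if pvCondE cluster "controls" e then ["控股"] else []))

def pvPairList (cluster : List String) : List (String × String) :=
  cluster.flatMap (fun c1 => cluster.map (fun c2 => (c1, c2)))

def pvMkDict (ld : List (String × String × List (String × Bool))) : PySem.Dict (String × String) (List (String × Bool)) :=
  PySem.Dict.mk (ld.map (fun e => ((e.1, e.2.1), e.2.2)))

theorem foldl_enumerate_snd {α β : Type} (l : List α) (g : β → α → β) (i : β) (s : Int) :
    (PySem.List.enumerate l s).foldl (fun a ic => g a ic.2) i = l.foldl g i := by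
  induction l generalizing i s with
  | nil => simp [PySem.List.enumerate_nil]
  | cons x t ih => simp [PySem.List.enumerate_cons, ih]

theorem step_eq (ld : List (String × String × List (String × Bool))) (c1 c2 : String) (s : PySem.Set String) :
    (if c1 != c2 then
        let details := pvLookup ld c1 c2
        let lt1 := if pvDet details "legal_person" then PySem.Set.add s "法人" else s
        let lt2 := if pvDet details "phone" then PySem.Set.add lt1 "电话" else lt1
        let lt3 := if pvDet details "employment" then PySem.Set.add lt2 "任职" else lt2
        if pvDet details "controls" then PySem.Set.add lt3 "控股" else lt3
      else s) = (pvTrig ld (c1, c2)).foldl PySem.Set.add s := by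
  by_cases hne : (c1 != c2) = true
  · simp only [hne, if_true]
    by_cases h0 : pvDet (pvLookup ld c1 c2) "legal_person" <;>
    by_cases h1 : pvDet (pvLookup ld c1 c2) "phone" <;>
    by_cases h2 : pvDet (pvLookup ld c1 c2) "employment" <;>
    by_cases h3 : pvDet (pvLookup ld c1 c2) "controls" <;>
      simp [pvTrig, pvCondA, hne, h0, h1, h2, h3]
  · simp only [Bool.not_eq_true] at hne
    simp [pvTrig, pvCondA, hne]

theorem step_eq_B (cluster : List String) (e : String × String × List (String × Bool)) (s : PySem.Set String) :
    (if e.1 != e.2.1 && PySem.Set.contains (PySem.Set.ofList cluster) e.1 && PySem.Set.contains (PySem.Set.ofList cluster) e.2.1 then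
        let lt1 := if pvDet e.2.2 "legal_person" then PySem.Set.add s "法人" else s
        let lt2 := if pvDet e.2.2 "phone" then PySem.Set.add lt1 "电话" else lt1
        let lt3 := if pvDet e.2.2 "employment" then PySem.Set.add lt2 "任职" else lt2
        if pvDet e.2.2 "controls" then PySem.Set.add lt3 "控股" else lt3
      else s) = (pvTrigE cluster e).foldl PySem.Set.add s := by
  have hq : (e.1 != e.2.1 && PySem.Set.contains (PySem.Set.ofList cluster) e.1 && PySem.Set.contains (PySem.Set.ofList cluster) e.2.1)
      = pvQualB cluster e := by
    unfold pvQualB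
    have h1 : PySem.Set.contains (PySem.Set.ofList cluster) e.1 = cluster.contains e.1 := by
      simp [PySem.Set.mem_ofList]
    have h2 : PySem.Set.contains (PySem.Set.ofList cluster) e.2.1 = cluster.contains e.2.1 := by
      simp [PySem.Set.mem_ofList]
    rw [h1, h2]
  rw [hq]
  by_cases hqe : pvQualB cluster e = true
  · simp only [hqe, if_true]
    by_cases h0 : pvDet e.2.2 "legal_person" <;>
    by_cases h1 : pvDet e.2.2 "phone" <;>
    by_cases h2 : pvDet e.2.2 "employment" <;>
    by_cases h3 : pvDet e.2.2 "controls" <;>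
      simp [pvTrigE, pvCondE, hqe, h0, h1, h2, h3]
  · simp only [Bool.not_eq_true] at hqe
    simp [pvTrigE, pvCondE, hqe]

theorem A_flat (cluster : List String) (ld : List (String × String × List (String × Bool))) :
    get_cluster_link_types cluster ld
      = PySem.List.sorted (PySem.Set.ofList ((pvPairList cluster).flatMap (pvTrig ld))) (fun x => x) false := by
  unfold get_cluster_link_types pvPairList
  show PySem.List.sorted ((PySem.List.enumerate cluster).foldl (fun link_types ic =>
      cluster.foldl (fun link_types c2 =>
        if ic.2 != c2 then
          let details := pvLookup ld ic.2 c2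
          let lt1 := if pvDet details "legal_person" then PySem.Set.add link_types "法人" else link_types
          let lt2 := if pvDet details "phone" then PySem.Set.add lt1 "电话" else lt1
          let lt3 := if pvDet details "employment" then PySem.Set.add lt2 "任职" else lt2
          if pvDet details "controls" then PySem.Set.add lt3 "控股" else lt3
        else link_types) link_types) PySem.Set.empty) (fun x => x) false = _
  congr 1
  rw [PySem.Set.ofList_eq_foldl, List.foldl_flatMap, List.foldl_flatMap]
  rw [foldl_enumerate_snd cluster
    (fun s c1 => cluster.foldl (fun link_types c2 =>
      if c1 != c2 then
        let details := pvLookup ld c1 c2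
        let lt1 := if pvDet details "legal_person" then PySem.Set.add link_types "法人" else link_types
        let lt2 := if pvDet details "phone" then PySem.Set.add lt1 "电话" else lt1
        let lt3 := if pvDet details "employment" then PySem.Set.add lt2 "任职" else lt2
        if pvDet details "controls" then PySem.Set.add lt3 "控股" else lt3
      else link_types) s) PySem.Set.empty 0]
  congr 1
  funext s c1
  rw [List.foldl_map]
  congr 1
  funext s' c2
  exact step_eq ld c1 c2 s'

theorem B_flat (cluster : List String) (ld : List (String × String × List (String × Bool))) :
    get_cluster_link_types_alt cluster ld
      = PySem.List.sorted (PySem.Set.ofList ((pvItems ld PySem.Set.empty).flatMap (pvTrigE cluster))) (fun x => x) false := by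
  unfold get_cluster_link_types_alt
  show PySem.List.sorted ((pvItems ld PySem.Set.empty).foldl (fun lt e =>
      if e.1 != e.2.1 && PySem.Set.contains (PySem.Set.ofList cluster) e.1 && PySem.Set.contains (PySem.Set.ofList cluster) e.2.1 then
        let lt1 := if pvDet e.2.2 "legal_person" then PySem.Set.add lt "法人" else lt
        let lt2 := if pvDet e.2.2 "phone" then PySem.Set.add lt1 "电话" else lt1
        let lt3 := if pvDet e.2.2 "employment" then PySem.Set.add lt2 "任职" else lt2
        if pvDet e.2.2 "controls" then PySem.Set.add lt3 "控股" else lt3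
      else lt) PySem.Set.empty) (fun x => x) false = _
  congr 1
  conv_rhs => rw [PySem.Set.ofList_eq_foldl, List.foldl_flatMap]
  congr 1
  funext s e
  exact step_eq_B cluster e s

theorem pvItems_sound : ∀ (ld : List (String × String × List (String × Bool))) (seen : PySem.Set (String × String)),
    ∀ e ∈ pvItems ld seen,
      PySem.Set.contains seen (e.1, e.2.1) = false ∧ (pvMkDict ld).get? (e.1, e.2.1) = some e.2.2 := by
  intro ld
  induction ld with
  | nil => intro seen e he; simp [pvItems] at he
  | cons e1 rest ih =>
    intro seen e he
    simp only [pvItems] at he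
    have hmk : (pvMkDict (e1 :: rest)).get? (e.1, e.2.1)
        = if (e1.1, e1.2.1) == (e.1, e.2.1) then some e1.2.2 else (pvMkDict rest).get? (e.1, e.2.1) := by
      unfold pvMkDict
      rw [List.map_cons]
      exact PySem.Dict.get?_mk_cons _ _ _ _
    by_cases h1 : PySem.Set.contains seen (e1.1, e1.2.1) = true
    · rw [if_pos h1] at he
      obtain ⟨hc, hg⟩ := ih seen e he
      refine ⟨hc, ?_⟩
      rw [hmk, if_neg, hg]
      intro hbeq
      have : (e1.1, e1.2.1) = (e.1, e.2.1) := by simpa using hbeq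
      rw [this] at h1
      rw [h1] at hc
      simp at hc
    · rw [if_neg h1] at he
      rcases List.mem_cons.mp he with rfl | he'
      · refine ⟨by simpa using h1, ?_⟩
        rw [hmk, if_pos (by simp)]
      · obtain ⟨hc, hg⟩ := ih _ e he'
        have hcadd : PySem.Set.contains seen (e.1, e.2.1) = false ∧ (e.1, e.2.1) ≠ (e1.1, e1.2.1) := by
          constructor
          · by_contra hcc
            have hmm' : (e.1, e.2.1) ∈ PySem.Set.add seen (e1.1, e1.2.1) := by
              rw [PySem.Set.mem_add]
              left
              simp only [Bool.not_eq_false] at hcc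
              simpa [PySem.Set.contains] using hcc
            have hcc2 : PySem.Set.contains (PySem.Set.add seen (e1.1, e1.2.1)) (e.1, e.2.1) = true := by
              simpa [PySem.Set.contains] using hmm'
            rw [hcc2] at hc
            simp at hc
          · intro heq
            have hmm' : (e.1, e.2.1) ∈ PySem.Set.add seen (e1.1, e1.2.1) := by
              rw [PySem.Set.mem_add]; right; exact heq
            have hcc2 : PySem.Set.contains (PySem.Set.add seen (e1.1, e1.2.1)) (e.1, e.2.1) = true := by
              simpa [PySem.Set.contains] using hmm'
            rw [hcc2] at hc
            simp at hc
        refine ⟨hcadd.1, ?_⟩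
        rw [hmk, if_neg, hg]
        intro hbeq
        have heq2 : (e1.1, e1.2.1) = (e.1, e.2.1) := by simpa using hbeq
        exact hcadd.2 heq2.symm

theorem pvItems_complete : ∀ (ld : List (String × String × List (String × Bool))) (seen : PySem.Set (String × String))
    (c1 c2 : String) (d : List (String × Bool)),
    (pvMkDict ld).get? (c1, c2) = some d → PySem.Set.contains seen (c1, c2) = false →
    (c1, (c2, d)) ∈ pvItems ld seen := by
  intro ld
  induction ld with
  | nil =>
    intro seen c1 c2 d hg _
    rw [show pvMkDict [] = PySem.Dict.empty from rfl, PySem.Dict.get?_empty] at hg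
    cases hg
  | cons e1 rest ih =>
    intro seen c1 c2 d hg hc
    have hmk : (pvMkDict (e1 :: rest)).get? (c1, c2)
        = if (e1.1, e1.2.1) == (c1, c2) then some e1.2.2 else (pvMkDict rest).get? (c1, c2) := by
      unfold pvMkDict
      rw [List.map_cons]
      exact PySem.Dict.get?_mk_cons _ _ _ _
    rw [hmk] at hg
    simp only [pvItems]
    by_cases hbeq : (e1.1, e1.2.1) = (c1, c2)
    · rw [if_pos (by simpa using hbeq)] at hg
      have hd : e1.2.2 = d := by simpa using hg
      have h1 : PySem.Set.contains seen (e1.1, e1.2.1) = false := by rw [hbeq]; exact hc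
      rw [if_neg (by rw [h1]; simp)]
      have h11 : e1.1 = c1 := congrArg Prod.fst hbeq
      have h12 : e1.2.1 = c2 := congrArg Prod.snd hbeq
      have he1 : e1 = (c1, c2, d) := by rw [← h11, ← h12, ← hd]
      exact he1 ▸ List.mem_cons_self
    · rw [if_neg (by simpa using hbeq)] at hg
      by_cases h1 : PySem.Set.contains seen (e1.1, e1.2.1) = true
      · rw [if_pos h1]
        exact ih seen c1 c2 d hg hc
      · rw [if_neg h1]
        right
        apply ih _ c1 c2 d hg
        have : ¬ (c1, c2) ∈ PySem.Set.add seen (e1.1, e1.2.1) := by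
          rw [PySem.Set.mem_add]
          rintro (hmem | heq)
          · rw [show PySem.Set.contains seen (c1, c2) = true from by simpa [PySem.Set.contains] using hmem] at hc
            simp at hc
          · exact hbeq heq.symm
        simpa [PySem.Set.contains] using this

theorem lookup_getD (ld : List (String × String × List (String × Bool))) (c1 c2 : String) :
    pvLookup ld c1 c2 = ((pvMkDict ld).get? (c1, c2)).getD [] := by
  unfold pvLookup pvMkDict
  rw [PySem.Dict.getD_eq_get?_getD]

theorem pvDet_nil (key : String) : pvDet [] key = false := rfl

-- for a fixed link key, some ordered cluster pair triggers it iff some dict item does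
theorem cond_bridge (cluster : List String) (ld : List (String × String × List (String × Bool))) (key : String) :
    (∃ p ∈ pvPairList cluster, pvCondA ld key p = true)
      ↔ (∃ e ∈ pvItems ld PySem.Set.empty, pvCondE cluster key e = true) := by
  constructor
  · rintro ⟨p, hp, hc⟩
    unfold pvCondA at hc
    rw [Bool.and_eq_true] at hc
    obtain ⟨hne, hdet⟩ := hc
    have hpmem : p.1 ∈ cluster ∧ p.2 ∈ cluster := by
      unfold pvPairList at hp
      rw [List.mem_flatMap] at hp
      obtain ⟨a, ha, hpm⟩ := hp
      rw [List.mem_map] at hpm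
      obtain ⟨b, hb, hpe⟩ := hpm
      rw [← hpe]
      exact ⟨ha, hb⟩
    cases hg : (pvMkDict ld).get? (p.1, p.2) with
    | none =>
      rw [lookup_getD, hg] at hdet
      simp only [Option.getD_none] at hdet
      rw [pvDet_nil] at hdet
      cases hdet
    | some d =>
      refine ⟨(p.1, p.2, d), pvItems_complete ld [] p.1 p.2 d hg rfl, ?_⟩
      unfold pvCondE pvQualB
      rw [lookup_getD, hg] at hdet
      simp only [Option.getD_some] at hdet
      simp [hne, hdet, hpmem.1, hpmem.2]
  · rintro ⟨e, he, hc⟩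
    unfold pvCondE pvQualB at hc
    rw [Bool.and_eq_true, Bool.and_eq_true, Bool.and_eq_true] at hc
    obtain ⟨⟨⟨hne, hm1⟩, hm2⟩, hdet⟩ := hc
    refine ⟨(e.1, e.2.1), ?_, ?_⟩
    · unfold pvPairList
      rw [List.mem_flatMap]
      exact ⟨e.1, List.contains_iff_mem.mp hm1, by
        rw [List.mem_map]
        exact ⟨e.2.1, List.contains_iff_mem.mp hm2, rfl⟩⟩
    · unfold pvCondA
      rw [lookup_getD, (pvItems_sound ld [] e he).2]
      simp only [Option.getD_some]
      simpa [hne] using hdet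

theorem mem_flat_iff (cond : String → (String × String) → Bool) (P : List (String × String)) (x : String)
    (trig : (String × String) → List String)
    (htrig : ∀ p, trig p = ((if cond "legal_person" p then ["法人"] else []) ++ (if cond "phone" p then ["电话"] else [])) ++
      ((if cond "employment" p then ["任职"] else []) ++ (if cond "controls" p then ["控股"] else []))) :
    x ∈ P.flatMap trig ↔
      ((∃ p ∈ P, cond "legal_person" p = true) ∧ x = "法人") ∨
      ((∃ p ∈ P, cond "phone" p = true) ∧ x = "电话") ∨
      ((∃ p ∈ P, cond "employment" p = true) ∧ x = "任职") ∨
      ((∃ p ∈ P, cond "controls" p = true) ∧ x = "控股") := by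
  rw [List.mem_flatMap]
  constructor
  · rintro ⟨p, hp, hx⟩
    rw [htrig p] at hx
    rcases List.mem_append.mp hx with h | h <;> rcases List.mem_append.mp h with h' | h' <;>
      [skip; skip; skip; skip] <;>
    · split at h'
      · rename_i hcond
        first
        | exact Or.inl ⟨⟨p, hp, hcond⟩, List.mem_singleton.mp h'⟩
        | exact Or.inr (Or.inl ⟨⟨p, hp, hcond⟩, List.mem_singleton.mp h'⟩)
        | exact Or.inr (Or.inr (Or.inl ⟨⟨p, hp, hcond⟩, List.mem_singleton.mp h'⟩))
        | exact Or.inr (Or.inr (Or.inr ⟨⟨p, hp, hcond⟩, List.mem_singleton.mp h'⟩))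
      · simp at h'
  · rintro (⟨⟨p, hp, hc⟩, rfl⟩ | ⟨⟨p, hp, hc⟩, rfl⟩ | ⟨⟨p, hp, hc⟩, rfl⟩ | ⟨⟨p, hp, hc⟩, rfl⟩) <;>
      exact ⟨p, hp, by rw [htrig p]; simp [hc]⟩

theorem mem_flat_iff_E (cluster : List String) (E : List (String × String × List (String × Bool))) (x : String) :
    x ∈ E.flatMap (pvTrigE cluster) ↔
      ((∃ e ∈ E, pvCondE cluster "legal_person" e = true) ∧ x = "法人") ∨
      ((∃ e ∈ E, pvCondE cluster "phone" e = true) ∧ x = "电话") ∨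
      ((∃ e ∈ E, pvCondE cluster "employment" e = true) ∧ x = "任职") ∨
      ((∃ e ∈ E, pvCondE cluster "controls" e = true) ∧ x = "控股") := by
  rw [List.mem_flatMap]
  constructor
  · rintro ⟨e, he, hx⟩
    unfold pvTrigE at hx
    rcases List.mem_append.mp hx with h | h <;> rcases List.mem_append.mp h with h' | h' <;>
    · split at h'
      · rename_i hcond
        first
        | exact Or.inl ⟨⟨e, he, hcond⟩, List.mem_singleton.mp h'⟩
        | exact Or.inr (Or.inl ⟨⟨e, he, hcond⟩, List.mem_singleton.mp h'⟩)
        | exact Or.inr (Or.inr (Or.inl ⟨⟨e, he, hcond⟩, List.mem_singleton.mp h'⟩))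
        | exact Or.inr (Or.inr (Or.inr ⟨⟨e, he, hcond⟩, List.mem_singleton.mp h'⟩))
      · simp at h'
  · rintro (⟨⟨e, he, hc⟩, rfl⟩ | ⟨⟨e, he, hc⟩, rfl⟩ | ⟨⟨e, he, hc⟩, rfl⟩ | ⟨⟨e, he, hc⟩, rfl⟩) <;>
      exact ⟨e, he, by unfold pvTrigE; simp [hc]⟩

theorem sets_same_mem (cluster : List String) (ld : List (String × String × List (String × Bool))) (x : String) :
    x ∈ PySem.Set.ofList ((pvPairList cluster).flatMap (pvTrig ld))
      ↔ x ∈ PySem.Set.ofList ((pvItems ld PySem.Set.empty).flatMap (pvTrigE cluster)) := by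
  rw [PySem.Set.mem_ofList, PySem.Set.mem_ofList]
  rw [mem_flat_iff (pvCondA ld) (pvPairList cluster) x (pvTrig ld) (fun p => rfl)]
  rw [mem_flat_iff_E]
  have h0 := cond_bridge cluster ld "legal_person"
  have h1 := cond_bridge cluster ld "phone"
  have h2 := cond_bridge cluster ld "employment"
  have h3 := cond_bridge cluster ld "controls"
  rw [h0, h1, h2, h3]

theorem sorted_set_ext (s t : PySem.Set String) (hs : List.Nodup s) (ht : List.Nodup t)
    (hmem : ∀ x, x ∈ s ↔ x ∈ t) :
    PySem.List.sorted s (fun x => x) false = PySem.List.sorted t (fun x => x) false := by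
  have hperm : s.Perm t := (List.perm_ext_iff_of_nodup hs ht).mpr hmem
  have htperm : (PySem.List.sorted t (fun x => x) false).Perm s :=
    (PySem.List.sorted_perm t (fun x => x) false).trans hperm.symm
  have hle : (PySem.List.sorted t (fun x => x) false).Pairwise (fun a b => a ≤ b) :=
    PySem.List.sorted_pairwise t (fun x => x)
  exact PySem.List.sorted_id_eq_of_perm_of_pairwise _ _ htperm hle

-- ===== VERDICT (by name: the statement is the Claim_ definition above) =====
theorem get_cluster_link_types_spec : Claim_equal_get_cluster_link_types := by
  intro cluster ld _
  unfold Spec_get_cluster_link_types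
  rw [A_flat, B_flat]
  exact sorted_set_ext _ _ (PySem.Set.nodup_ofList _) (PySem.Set.nodup_ofList _)
    (sets_same_mem cluster ld)
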